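-- pv_equiv track=rewrite | github.com/HasinthakaPiyumal/ai-pattern-mining-outline | data/code communities/optillm/cluster_19.py | parse_combined_approach
-- ===== SOURCE A (Python) =====
-- def parse_combined_approach(model: str, known_approaches: list, plugin_approaches: dict):
--     if model == 'auto':
--         return ('SINGLE', ['none'], model)
--     parts = model.split('-')
--     approaches = []
--     operation = 'SINGLE'
--     model_parts = []
--     parsing_approaches = True
--     for part in parts:
--         if parsing_approaches:
--             if part in known_approaches or part in plugin_approaches:
--                 approaches.append(part)
--             elif '&' in part:
--                 operation = 'AND'
--                 approaches.extend(part.split('&'))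
--             elif '|' in part:
--                 operation = 'OR'
--                 approaches.extend(part.split('|'))
--             else:
--                 parsing_approaches = False
--                 model_parts.append(part)
--         else:
--             model_parts.append(part)
--     if not approaches:
--         approaches = ['none']
--         operation = 'SINGLE'
--     actual_model = '-'.join(model_parts)
--     return (operation, approaches, actual_model)
-- ===== SOURCE B (Python) =====
-- def parse_combined_approach(model: str, known_approaches: list, plugin_approaches: dict):
--     if model == 'auto':
--         return ('SINGLE', ['none'], model)
--     parts = model.split('-')
--     k = 0
--     while k < len(parts) and (parts[k] in known_approaches or parts[k] in plugin_approaches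
--                               or '&' in parts[k] or '|' in parts[k]):
--         k += 1
--     approaches = []
--     operation = 'SINGLE'
--     for p in parts[:k]:
--         if p in known_approaches or p in plugin_approaches:
--             approaches.append(p)
--         elif '&' in p:
--             operation = 'AND'
--             approaches.extend(p.split('&'))
--         else:
--             operation = 'OR'
--             approaches.extend(p.split('|'))
--     if not approaches:
--         approaches = ['none']
--         operation = 'SINGLE'
--     return (operation, approaches, '-'.join(parts[k:]))
-- ===== Notes on version B (the rewrite author's own statement) =====
-- stated objective: alternative
-- what changed: A's single flag-driven loop (parsing_approaches toggled mid-stream) is replaced by two separate passes: first find the boundary index between approach parts and model parts, then classify the approach prefix and join the remaining suffix directly.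
import Mathlib
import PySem

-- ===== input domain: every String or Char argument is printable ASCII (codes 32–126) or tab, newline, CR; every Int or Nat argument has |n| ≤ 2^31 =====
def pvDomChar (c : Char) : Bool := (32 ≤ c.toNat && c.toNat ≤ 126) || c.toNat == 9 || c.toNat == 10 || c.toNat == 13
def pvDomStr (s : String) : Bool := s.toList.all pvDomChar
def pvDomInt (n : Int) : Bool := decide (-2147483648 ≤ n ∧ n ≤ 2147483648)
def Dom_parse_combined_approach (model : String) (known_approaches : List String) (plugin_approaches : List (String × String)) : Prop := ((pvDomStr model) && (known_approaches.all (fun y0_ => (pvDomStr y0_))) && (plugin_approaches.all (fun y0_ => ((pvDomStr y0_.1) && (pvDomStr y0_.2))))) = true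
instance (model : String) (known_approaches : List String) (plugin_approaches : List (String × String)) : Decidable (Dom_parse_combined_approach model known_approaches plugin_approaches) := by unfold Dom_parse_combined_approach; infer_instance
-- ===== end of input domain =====

-- B replaces A's single flag-driven loop by two passes: first find the boundary index
-- between approach parts and model parts, then classify the prefix and join the suffix
-- (objective: simpler decomposition; same cost).

-- s.split(sep) for a NONEMPTY literal sep: Str.split? is some there, so getD never fires (exact)
def pvSplit (s sep : String) : List String := (PySem.Str.split? s sep).getD []

-- ===== PORT A =====
-- one step of A's loop; state = (approaches, operation, model_parts, parsing_approaches)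
def pvStepA (known_approaches : List String) (plugin_approaches : List (String × String))
    (s : List String × String × List String × Bool) (part : String) :
    List String × String × List String × Bool :=
  if s.2.2.2 then
    if known_approaches.contains part || plugin_approaches.any (fun kv => kv.1 == part) then
      (s.1 ++ [part], s.2.1, s.2.2.1, true)
    else if PySem.Str.isIn "&" part then
      (s.1 ++ pvSplit part "&", "AND", s.2.2.1, true)
    else if PySem.Str.isIn "|" part then
      (s.1 ++ pvSplit part "|", "OR", s.2.2.1, true)
    else
      (s.1, s.2.1, s.2.2.1 ++ [part], false)
  else
    (s.1, s.2.1, s.2.2.1 ++ [part], false)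

def parse_combined_approach (model : String) (known_approaches : List String) (plugin_approaches : List (String × String)) : String × List String × String :=
  if model == "auto" then ("SINGLE", ["none"], model) else
  let parts := pvSplit model "-"
  let st := parts.foldl (pvStepA known_approaches plugin_approaches) ([], "SINGLE", [], true)
  let approaches := st.1
  let operation := st.2.1
  let model_parts := st.2.2.1
  if approaches.isEmpty then
    ("SINGLE", ["none"], PySem.Str.join "-" model_parts)
  else
    (operation, approaches, PySem.Str.join "-" model_parts)

-- ===== PORT B =====
-- does a part belong to the approach prefix?
def pvQual (known_approaches : List String) (plugin_approaches : List (String × String)) (part : String) : Bool :=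
  known_approaches.contains part || plugin_approaches.any (fun kv => kv.1 == part)
    || PySem.Str.isIn "&" part || PySem.Str.isIn "|" part

-- Source B's while loop: length of the qualifying prefix
def pvBoundary (known_approaches : List String) (plugin_approaches : List (String × String)) : List String → Nat
  | [] => 0
  | p :: rest => if pvQual known_approaches plugin_approaches p then pvBoundary known_approaches plugin_approaches rest + 1 else 0

-- Source B's second loop: classify one prefix part; state = (approaches, operation)
def pvStepB (known_approaches : List String) (plugin_approaches : List (String × String))
    (s : List String × String) (p : String) : List String × String :=
  if known_approaches.contains p || plugin_approaches.any (fun kv => kv.1 == p) then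
    (s.1 ++ [p], s.2)
  else if PySem.Str.isIn "&" p then
    (s.1 ++ pvSplit p "&", "AND")
  else
    (s.1 ++ pvSplit p "|", "OR")

def parse_combined_approach_alt (model : String) (known_approaches : List String) (plugin_approaches : List (String × String)) : String × List String × String :=
  if model == "auto" then ("SINGLE", ["none"], model) else
  let parts := pvSplit model "-"
  let k := pvBoundary known_approaches plugin_approaches parts
  let st := (parts.take k).foldl (pvStepB known_approaches plugin_approaches) ([], "SINGLE")
  if st.1.isEmpty then
    ("SINGLE", ["none"], PySem.Str.join "-" (parts.drop k))
  else
    (st.2, st.1, PySem.Str.join "-" (parts.drop k))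

-- ===== PRECONDITION & SPEC =====
def Spec_parse_combined_approach (model : String) (known_approaches : List String) (plugin_approaches : List (String × String)) (out : String × List String × String) : Prop := out = parse_combined_approach_alt model known_approaches plugin_approaches
instance (model : String) (known_approaches : List String) (plugin_approaches : List (String × String)) (out : String × List String × String) : Decidable (Spec_parse_combined_approach model known_approaches plugin_approaches out) := by unfold Spec_parse_combined_approach; infer_instance

-- ===== CLAIM (what is proved, stated in full; the proofs are below) =====
def Claim_equal_parse_combined_approach : Prop := ∀ (model : String) (known_approaches : List String) (plugin_approaches : List (String × String)), Dom_parse_combined_approach model known_approaches plugin_approaches → Spec_parse_combined_approach model known_approaches plugin_approaches (parse_combined_approach model known_approaches plugin_approaches)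

-- ===== LEMMAS AND PROOFS =====

-- once parsing_approaches is False, A's loop only appends parts to model_parts
theorem pvFoldA_false (ka : List String) (pa : List (String × String)) :
    ∀ (parts : List String) (a : List String) (o : String) (mp : List String),
    parts.foldl (pvStepA ka pa) (a, o, mp, false) = (a, o, mp ++ parts, false) := by
  intro parts
  induction parts with
  | nil => intro a o mp; simp
  | cons p rest ih =>
    intro a o mp
    have e : pvStepA ka pa (a, o, mp, false) p = (a, o, mp ++ [p], false) := by
      unfold pvStepA
      rw [if_neg (by exact Bool.false_ne_true)]
    rw [List.foldl_cons, e, ih]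
    simp

-- A's loop from a still-parsing state = B's classify pass on the qualifying prefix,
-- with the suffix as model_parts
theorem pvFoldA_eq (ka : List String) (pa : List (String × String)) :
    ∀ (parts : List String) (a : List String) (o : String),
    parts.foldl (pvStepA ka pa) (a, o, ([] : List String), true) =
      (let k := pvBoundary ka pa parts
       let st := (parts.take k).foldl (pvStepB ka pa) (a, o)
       (st.1, st.2, parts.drop k, decide (k = parts.length))) := by
  intro parts
  induction parts with
  | nil => intro a o; simp [pvBoundary]
  | cons p rest ih =>
    intro a o
    by_cases h1 : (ka.contains p || pa.any (fun kv => kv.1 == p)) = true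
    · have hq : pvQual ka pa p = true := by unfold pvQual; rw [h1]; rfl
      have eA : pvStepA ka pa (a, o, [], true) p = (a ++ [p], o, [], true) := by
        unfold pvStepA; rw [if_pos rfl, if_pos h1]
      have eB : pvStepB ka pa (a, o) p = (a ++ [p], o) := by
        unfold pvStepB; rw [if_pos h1]
      have hb : pvBoundary ka pa (p :: rest) = pvBoundary ka pa rest + 1 := by
        simp only [pvBoundary, hq, if_true]
      rw [List.foldl_cons, eA, ih, hb]
      simp only [List.take_succ_cons, List.drop_succ_cons, List.foldl_cons, eB, List.length_cons]
      simp
    · rw [Bool.not_eq_true] at h1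
      have h1' : ¬ ((ka.contains p || pa.any (fun kv => kv.1 == p)) = true) := by
        rw [h1]; exact Bool.false_ne_true
      by_cases h2 : PySem.Str.isIn "&" p = true
      · have hq : pvQual ka pa p = true := by unfold pvQual; rw [h1, h2]; rfl
        have eA : pvStepA ka pa (a, o, [], true) p = (a ++ pvSplit p "&", "AND", [], true) := by
          unfold pvStepA; rw [if_pos rfl, if_neg h1', if_pos h2]
        have eB : pvStepB ka pa (a, o) p = (a ++ pvSplit p "&", "AND") := by
          unfold pvStepB; rw [if_neg h1', if_pos h2]
        have hb : pvBoundary ka pa (p :: rest) = pvBoundary ka pa rest + 1 := by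
          simp only [pvBoundary, hq, if_true]
        rw [List.foldl_cons, eA, ih, hb]
        simp only [List.take_succ_cons, List.drop_succ_cons, List.foldl_cons, eB, List.length_cons]
        simp
      · rw [Bool.not_eq_true] at h2
        have h2' : ¬ (PySem.Str.isIn "&" p = true) := by rw [h2]; exact Bool.false_ne_true
        by_cases h3 : PySem.Str.isIn "|" p = true
        · have hq : pvQual ka pa p = true := by unfold pvQual; rw [h1, h2, h3]; rfl
          have eA : pvStepA ka pa (a, o, [], true) p = (a ++ pvSplit p "|", "OR", [], true) := by
            unfold pvStepA; rw [if_pos rfl, if_neg h1', if_neg h2', if_pos h3]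
          have eB : pvStepB ka pa (a, o) p = (a ++ pvSplit p "|", "OR") := by
            unfold pvStepB; rw [if_neg h1', if_neg h2']
          have hb : pvBoundary ka pa (p :: rest) = pvBoundary ka pa rest + 1 := by
            simp only [pvBoundary, hq, if_true]
          rw [List.foldl_cons, eA, ih, hb]
          simp only [List.take_succ_cons, List.drop_succ_cons, List.foldl_cons, eB,
            List.length_cons]
          simp
        · rw [Bool.not_eq_true] at h3
          have h3' : ¬ (PySem.Str.isIn "|" p = true) := by rw [h3]; exact Bool.false_ne_true
          have hq : ¬ (pvQual ka pa p = true) := by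
            unfold pvQual; rw [h1, h2, h3]; exact Bool.false_ne_true
          have eA : pvStepA ka pa (a, o, [], true) p = (a, o, [] ++ [p], false) := by
            unfold pvStepA; rw [if_pos rfl, if_neg h1', if_neg h2', if_neg h3']
          have hb : pvBoundary ka pa (p :: rest) = 0 := by
            simp only [pvBoundary]; rw [if_neg hq]
          rw [List.foldl_cons, eA, pvFoldA_false, hb]
          simp only [List.take_zero, List.drop_zero, List.foldl_nil, List.length_cons]
          simp

-- ===== VERDICT (by name: the statement is the Claim_ definition above) =====
theorem parse_combined_approach_spec : Claim_equal_parse_combined_approach := by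
  intro model ka pa _
  unfold Spec_parse_combined_approach parse_combined_approach parse_combined_approach_alt
  by_cases hm : (model == "auto") = true
  · simp [hm]
  · simp only [hm, Bool.false_eq_true, if_false]
    rw [pvFoldA_eq]
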